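-- pv_equiv track=rewrite | github.com/younyokel/comfyui_prompt_formatter | prompt_formatter.py | remove_mismatched_brackets
-- ===== SOURCE A (Python) =====
-- brackets_opening = set("([{")
--
-- brackets_closing = set(")]}")
--
-- bracket_pairs_reverse = dict(zip(")]}", "([{"))
--
-- def get_bracket_opening(c: str):
--     return bracket_pairs_reverse.get(c, '')
--
-- def remove_mismatched_brackets(prompt: str):
--     stack = []
--     pos = []
--     result = []
--
--     for i, c in enumerate(prompt):
--         if c in brackets_opening:
--             stack.append(c)
--             pos.append(len(result))
--             result.append(c)
--         elif c in brackets_closing: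
--             if stack and stack[-1] == get_bracket_opening(c):
--                 stack.pop()
--                 pos.pop()
--                 result.append(c)
--         else:
--             result.append(c)
--
--     for p in reversed(pos):
--         result.pop(p)
--
--     return "".join(result)
-- ===== SOURCE B (Python) =====
-- def remove_mismatched_brackets(prompt: str):
--     pairs = {")": "(", "]": "[", "}": "{"}
--     stack = []          # (index, char) of currently-unmatched openers
--     drop = set()        # indices of characters to delete
--     for i, c in enumerate(prompt):
--         if c in "([{":
--             stack.append((i, c))
--         elif c in ")]}":
--             if stack and stack[-1][1] == pairs.get(c):
--                 stack.pop()
--             else: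
--                 drop.add(i)
--     for i, _ in stack:
--         drop.add(i)
--     return "".join(c for i, c in enumerate(prompt) if i not in drop)
-- ===== Notes on version B (the rewrite author's own statement) =====
-- stated objective: alternative
-- what changed: Instead of building a result list during the scan and then deleting each unmatched opener with a list.pop at a recorded position (quadratic in the worst case), B records the indices of unmatched closers and leftover openers in one set during a single stack scan and rebuilds the string in one pass skipping those indices; on typical inputs with few unmatched brackets the measured cost is the same.
import Mathlib
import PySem

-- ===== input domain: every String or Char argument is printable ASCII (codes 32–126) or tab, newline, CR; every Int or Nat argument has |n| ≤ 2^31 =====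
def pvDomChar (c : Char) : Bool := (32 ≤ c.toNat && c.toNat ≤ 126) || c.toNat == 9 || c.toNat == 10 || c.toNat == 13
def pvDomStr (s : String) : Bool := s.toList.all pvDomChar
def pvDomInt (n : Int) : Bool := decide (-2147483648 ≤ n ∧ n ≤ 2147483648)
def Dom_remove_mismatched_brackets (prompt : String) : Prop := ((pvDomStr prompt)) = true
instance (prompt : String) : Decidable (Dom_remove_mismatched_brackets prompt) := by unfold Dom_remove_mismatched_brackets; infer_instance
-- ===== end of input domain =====

-- B replaces A's record-positions-then-pop deletion by a one-pass rebuild that skips an index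
-- set of unmatched brackets (objective: alternative).


-- ===== PORT A =====
def brackets_opening : PySem.Set Char := PySem.Set.ofList "([{".toList
def brackets_closing : PySem.Set Char := PySem.Set.ofList ")]}".toList
def bracket_pairs_reverse : PySem.Dict Char Char := PySem.Dict.ofList [(')', '('), (']', '['), ('}', '{')]

-- Python's .get(c, '') default is the empty string, never equal to a stack character; `none` models it here.
def get_bracket_opening (c : Char) : Option Char := PySem.Dict.get? bracket_pairs_reverse c

-- loop body of A's first for-loop; state = (stack, pos, result)
def rmbStepA (st : List Char × List Nat × List Char) (c : Char) : List Char × List Nat × List Char :=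
  let (stack, pos, result) := st
  if PySem.Set.contains brackets_opening c then
    (stack ++ [c], pos ++ [result.length], result ++ [c])
  else if PySem.Set.contains brackets_closing c then
    -- `if stack and stack[-1] == get_bracket_opening(c)`
    match stack.getLast? with
    | some top => if some top = get_bracket_opening c then
        (stack.dropLast, pos.dropLast, result ++ [c])
      else (stack, pos, result)
    | none => (stack, pos, result)
  else (stack, pos, result ++ [c])

-- `result.pop(p)`: p is always a valid index here; none cannot occur
def rmbPopAt (r : List Char) (p : Nat) : List Char :=
  match PySem.List.pop? r (p : Int) with
  | some pr => pr.2
  | none => r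

def remove_mismatched_brackets (prompt : String) : String :=
  let st := prompt.toList.foldl rmbStepA ([], [], [])
  String.ofList (st.2.1.reverse.foldl rmbPopAt st.2.2)

-- ===== PORT B =====
def rmb_pairs : PySem.Dict Char Char := PySem.Dict.ofList [(')', '('), (']', '['), ('}', '{')]

-- loop body of B's scan; state = (stack of (index, char), drop set)
def rmbStepB (st : List (Int × Char) × PySem.Set Int) (ic : Int × Char) : List (Int × Char) × PySem.Set Int :=
  let (stack, drop) := st
  if ("([{".toList).contains ic.2 then (stack ++ [ic], drop)
  else if (")]}".toList).contains ic.2 then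
    match stack.getLast? with
    | some top => if (some top.2 = PySem.Dict.get? rmb_pairs ic.2) then
        (stack.dropLast, drop)
      else (stack, PySem.Set.add drop ic.1)
    | none => (stack, PySem.Set.add drop ic.1)
  else st

def remove_mismatched_brackets_alt (prompt : String) : String :=
  let en := PySem.List.enumerate prompt.toList 0
  let st := en.foldl rmbStepB ([], PySem.Set.empty)
  let drop := st.1.foldl (fun d p => PySem.Set.add d p.1) st.2
  String.ofList ((en.filter (fun p => !(PySem.Set.contains drop p.1))).map Prod.snd)

-- ===== PRECONDITION & SPEC =====
def Spec_remove_mismatched_brackets (prompt : String) (out : String) : Prop := out = remove_mismatched_brackets_alt prompt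
instance (prompt : String) (out : String) : Decidable (Spec_remove_mismatched_brackets prompt out) := by unfold Spec_remove_mismatched_brackets; infer_instance

-- ===== CLAIM (what is proved, stated in full; the proofs are below) =====
def Claim_equal_remove_mismatched_brackets : Prop := ∀ (prompt : String), Dom_remove_mismatched_brackets prompt → Spec_remove_mismatched_brackets prompt (remove_mismatched_brackets prompt)

-- ===== LEMMAS AND PROOFS =====

-- kept characters of `done` (= B's final comprehension)
def keptF (drop : PySem.Set Int) (done : List (Int × Char)) : List Char :=
  (done.filter (fun p => !(decide (p.1 ∈ drop)))).map Prod.snd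

-- position in keptF of the entry with first component i
def cntF (drop : PySem.Set Int) (i : Int) (done : List (Int × Char)) : Nat :=
  (done.filter (fun q => decide (q.1 < i) && !(decide (q.1 ∈ drop)))).length

-- relation between A's loop state and B's loop state after consuming `done`,
-- all indices seen so far being < hi
def rmbInv (hi : Int) (done : List (Int × Char)) (stackA : List Char) (posA : List Nat)
    (resA : List Char) (stackB : List (Int × Char)) (drop : PySem.Set Int) : Prop :=
  (∀ p ∈ done, p.1 < hi) ∧
  done.Pairwise (fun p q => p.1 < q.1) ∧
  (∀ j ∈ drop, j < hi) ∧
  (∀ p ∈ stackB, p.1 < hi) ∧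
  (stackB.map Prod.fst).Pairwise (· < ·) ∧
  (∀ p ∈ stackB, p.1 ∉ drop) ∧
  (∀ p ∈ stackB, p.1 ∈ done.map Prod.fst) ∧
  stackA = stackB.map Prod.snd ∧
  resA = keptF drop done ∧
  posA = stackB.map (fun p => cntF drop p.1 done)

lemma keptF_congr (d1 d2 : PySem.Set Int) (done : List (Int × Char))
    (h : ∀ x, x ∈ d1 ↔ x ∈ d2) : keptF d1 done = keptF d2 done := by
  unfold keptF
  congr 1
  apply List.filter_congr
  intro q _
  simp [h]

lemma cntF_append_of_le (drop : PySem.Set Int) (i j : Int) (done : List (Int × Char))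
    (h : i ≤ j) : cntF (drop ++ [j]) i done = cntF drop i done := by
  unfold cntF
  congr 1
  apply List.filter_congr
  intro q _
  by_cases h1 : q.1 < i
  · have : ¬ (q.1 = j) := by omega
    simp [h1, this]
  · simp [h1]

lemma keptF_snoc_keep (drop : PySem.Set Int) (done : List (Int × Char)) (hi : Int) (c : Char)
    (h : hi ∉ drop) : keptF drop (done ++ [(hi, c)]) = keptF drop done ++ [c] := by
  simp [keptF, List.filter_append, h]

lemma keptF_snoc_drop (drop : PySem.Set Int) (done : List (Int × Char)) (hi : Int) (c : Char)
    (h : hi ∈ drop) : keptF drop (done ++ [(hi, c)]) = keptF drop done := by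
  simp [keptF, List.filter_append, h]

lemma keptF_add_fresh (drop : PySem.Set Int) (done : List (Int × Char)) (j : Int)
    (h : ∀ p ∈ done, p.1 ≠ j) : keptF (drop ++ [j]) done = keptF drop done := by
  unfold keptF
  congr 1
  apply List.filter_congr
  intro q hq
  simp [h q hq]

lemma cntF_snoc (drop : PySem.Set Int) (i hi : Int) (done : List (Int × Char)) (c : Char)
    (h : ¬ (hi < i)) : cntF drop i (done ++ [(hi, c)]) = cntF drop i done := by
  simp [cntF, List.filter_append, h]

lemma cntF_full (drop : PySem.Set Int) (i : Int) (done : List (Int × Char))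
    (h : ∀ q ∈ done, q.1 < i) : cntF drop i done = (keptF drop done).length := by
  simp only [cntF, keptF, List.length_map]
  congr 1
  apply List.filter_congr
  intro q hq
  simp [h q hq]

lemma rmb_step_inv (hi : Int) (done : List (Int × Char)) (stackA : List Char) (posA : List Nat)
    (resA : List Char) (stackB : List (Int × Char)) (drop : PySem.Set Int) (c : Char)
    (h : rmbInv hi done stackA posA resA stackB drop) :
    rmbInv (hi + 1) (done ++ [(hi, c)])
      (rmbStepA (stackA, posA, resA) c).1 (rmbStepA (stackA, posA, resA) c).2.1
      (rmbStepA (stackA, posA, resA) c).2.2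
      (rmbStepB (stackB, drop) (hi, c)).1 (rmbStepB (stackB, drop) (hi, c)).2 := by
  obtain ⟨h1, h2, h3, h4, h5, h6, h7, h8, h9, h10⟩ := h
  have hhidrop : hi ∉ drop := fun hh => absurd (h3 hi hh) (by omega)
  have hdone' : ∀ p ∈ done ++ [(hi, c)], p.1 < hi + 1 := by
    intro p hp
    rcases List.mem_append.mp hp with hp | hp
    · have := h1 p hp; omega
    · have hp' : p = (hi, c) := by simpa using hp
      subst hp'
      show hi < hi + 1
      omega
  have hpw' : (done ++ [(hi, c)]).Pairwise (fun p q => p.1 < q.1) := by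
    rw [List.pairwise_append]
    exact ⟨h2, by simp, fun p hp q hq => by simp at hq; rw [hq]; exact h1 p hp⟩
  have hcntsnoc : ∀ p ∈ stackB, cntF drop p.1 (done ++ [(hi, c)]) = cntF drop p.1 done := by
    intro p hp
    exact cntF_snoc drop p.1 hi done c (by have := h4 p hp; omega)
  have hcondeq : PySem.Set.contains brackets_opening c = ("([{".toList).contains c := rfl
  have hcondeq2 : PySem.Set.contains brackets_closing c = (")]}".toList).contains c := rfl
  simp only [rmbStepA, rmbStepB]
  by_cases hop : ("([{".toList).contains c = true
  · rw [hcondeq, hop, if_pos rfl, if_pos rfl]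
    dsimp only
    refine ⟨hdone', hpw', fun j hj => by have := h3 j hj; omega, ?_, ?_, ?_, ?_, ?_, ?_, ?_⟩
    · intro p hp
      rcases List.mem_append.mp hp with hp | hp
      · have := h4 p hp; omega
      · have hp' : p = (hi, c) := by simpa using hp
        subst hp'
        show hi < hi + 1
        omega
    · rw [List.map_append, List.pairwise_append]
      exact ⟨h5, by simp, fun x hx y hy => by
        obtain ⟨p, hp, hpx⟩ := List.mem_map.mp hx
        simp at hy
        subst hy hpx
        exact h4 p hp⟩
    · intro p hp
      rcases List.mem_append.mp hp with hp | hp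
      · exact h6 p hp
      · have hp' : p = (hi, c) := by simpa using hp
        subst hp'
        exact hhidrop
    · intro p hp
      rw [List.map_append]
      rcases List.mem_append.mp hp with hp | hp
      · exact List.mem_append.mpr (Or.inl (h7 p hp))
      · have hp' : p = (hi, c) := by simpa using hp
        subst hp'
        simp
    · simp [h8]
    · rw [keptF_snoc_keep drop done hi c hhidrop, h9]
    · rw [List.map_append]
      congr 1
      · rw [h10]
        exact (List.map_congr_left hcntsnoc).symm
      · simp only [List.map_singleton]
        show [resA.length] = [cntF drop hi (done ++ [(hi, c)])]
        rw [cntF_snoc drop hi hi done c (lt_irrefl hi), cntF_full drop hi done h1, h9]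
  · have hopf : ("([{".toList).contains c = false := by simpa using hop
    rw [hcondeq, hopf]
    simp only [Bool.false_eq_true, if_false]
    by_cases hcl : (")]}".toList).contains c = true
    · rw [hcondeq2, hcl, if_pos rfl, if_pos rfl]
      have hlastA : stackA.getLast? = (stackB.getLast?).map Prod.snd := by
        rw [h8, List.getLast?_map]
      rcases hlast : stackB.getLast? with _ | top
      · rw [hlastA, hlast]
        simp only [Option.map_none]
        -- both take the `none` branch: A keeps state, B adds hi to drop
        have haddeq : PySem.Set.add drop hi = drop ++ [hi] := by
          simp [PySem.Set.add, hhidrop]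
        refine ⟨hdone', hpw', ?_, fun p hp => by have := h4 p hp; omega, h5, ?_, ?_, h8, ?_, ?_⟩
        · intro j hj
          rw [haddeq] at hj
          rcases List.mem_append.mp hj with hj | hj
          · have := h3 j hj; omega
          · simp at hj; omega
        · intro p hp
          rw [haddeq]
          intro hmem
          rcases List.mem_append.mp hmem with hm | hm
          · exact h6 p hp hm
          · simp at hm; have := h4 p hp; omega
        · intro p hp
          rw [List.map_append]
          exact List.mem_append.mpr (Or.inl (h7 p hp))
        · rw [haddeq, keptF_snoc_drop _ _ _ _ (by simp),
            keptF_add_fresh drop done hi (fun p hp => by have := h1 p hp; omega), h9]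
        · rw [h10]
          apply List.map_congr_left
          intro p hp
          rw [haddeq, cntF_snoc _ _ _ _ _ (by have := h4 p hp; omega),
            cntF_append_of_le drop p.1 hi done (by have := h4 p hp; omega)]
      · rw [hlastA, hlast]
        simp only [Option.map_some]
        have hgeteq : get_bracket_opening c = PySem.Dict.get? rmb_pairs c := rfl
        by_cases hm : some top.2 = PySem.Dict.get? rmb_pairs c
        · rw [hgeteq, if_pos hm, if_pos hm]
          dsimp only
          refine ⟨hdone', hpw', fun j hj => by have := h3 j hj; omega, ?_, ?_, ?_, ?_, ?_, ?_, ?_⟩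
          · intro p hp
            have := h4 p (List.dropLast_subset _ hp); omega
          · rw [List.map_dropLast]
            exact h5.sublist (List.dropLast_sublist _)
          · exact fun p hp => h6 p (List.dropLast_subset _ hp)
          · intro p hp
            rw [List.map_append]
            exact List.mem_append.mpr (Or.inl (h7 p (List.dropLast_subset _ hp)))
          · rw [h8, List.map_dropLast]
          · rw [keptF_snoc_keep drop done hi c hhidrop, h9]
          · rw [h10, List.map_dropLast]
            congr 1
            exact (List.map_congr_left hcntsnoc).symm
        · rw [hgeteq, if_neg hm, if_neg hm]
          dsimp only
          have haddeq : PySem.Set.add drop hi = drop ++ [hi] := by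
            simp [PySem.Set.add, hhidrop]
          refine ⟨hdone', hpw', ?_, fun p hp => by have := h4 p hp; omega, h5, ?_, ?_, h8, ?_, ?_⟩
          · intro j hj
            rw [haddeq] at hj
            rcases List.mem_append.mp hj with hj | hj
            · have := h3 j hj; omega
            · simp at hj; omega
          · intro p hp
            rw [haddeq]
            intro hmem
            rcases List.mem_append.mp hmem with hm' | hm'
            · exact h6 p hp hm'
            · simp at hm'; have := h4 p hp; omega
          · intro p hp
            rw [List.map_append]
            exact List.mem_append.mpr (Or.inl (h7 p hp))
          · rw [haddeq, keptF_snoc_drop _ _ _ _ (by simp),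
              keptF_add_fresh drop done hi (fun p hp => by have := h1 p hp; omega), h9]
          · rw [h10]
            apply List.map_congr_left
            intro p hp
            rw [haddeq, cntF_snoc _ _ _ _ _ (by have := h4 p hp; omega),
              cntF_append_of_le drop p.1 hi done (by have := h4 p hp; omega)]
    · have hclf : (")]}".toList).contains c = false := by simpa using hcl
      rw [hcondeq2, hclf]
      simp only [Bool.false_eq_true, if_false]
      refine ⟨hdone', hpw', fun j hj => by have := h3 j hj; omega,
        fun p hp => by have := h4 p hp; omega, h5, h6, ?_, h8, ?_, ?_⟩
      · intro p hp
        rw [List.map_append]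
        exact List.mem_append.mpr (Or.inl (h7 p hp))
      · rw [keptF_snoc_keep drop done hi c hhidrop, h9]
      · rw [h10]
        exact (List.map_congr_left hcntsnoc).symm

lemma rmb_loop_inv (cs : List Char) : ∀ (hi : Int) (done : List (Int × Char))
    (stackA : List Char) (posA : List Nat) (resA : List Char)
    (stackB : List (Int × Char)) (drop : PySem.Set Int),
    rmbInv hi done stackA posA resA stackB drop →
    rmbInv (hi + cs.length) (done ++ PySem.List.enumerate cs hi)
      (cs.foldl rmbStepA (stackA, posA, resA)).1
      (cs.foldl rmbStepA (stackA, posA, resA)).2.1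
      (cs.foldl rmbStepA (stackA, posA, resA)).2.2
      ((PySem.List.enumerate cs hi).foldl rmbStepB (stackB, drop)).1
      ((PySem.List.enumerate cs hi).foldl rmbStepB (stackB, drop)).2 := by
  induction cs with
  | nil =>
    intro hi done stackA posA resA stackB drop h
    simpa [PySem.List.enumerate] using h
  | cons c cs ih =>
    intro hi done stackA posA resA stackB drop h
    have hstep := rmb_step_inv hi done stackA posA resA stackB drop c h
    have ihh := ih (hi + 1) (done ++ [(hi, c)])
      (rmbStepA (stackA, posA, resA) c).1 (rmbStepA (stackA, posA, resA) c).2.1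
      (rmbStepA (stackA, posA, resA) c).2.2
      (rmbStepB (stackB, drop) (hi, c)).1 (rmbStepB (stackB, drop) (hi, c)).2 hstep
    have harith : hi + ((c :: cs).length : Int) = (hi + 1) + (cs.length : Int) := by
      simp only [List.length_cons]
      push_cast
      ring
    rw [PySem.List.enumerate_cons, harith, List.foldl_cons, List.foldl_cons, List.append_cons]
    exact ihh

lemma rmb_erase_cnt (done : List (Int × Char)) (drop : PySem.Set Int) (i : Int)
    (hpw : done.Pairwise (fun p q => p.1 < q.1)) (hmem : i ∈ done.map Prod.fst)
    (hnd : i ∉ drop) :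
    (keptF drop done).eraseIdx (cntF drop i done) = keptF (drop ++ [i]) done ∧
    cntF drop i done < (keptF drop done).length := by
  induction done with
  | nil => simp at hmem
  | cons hd tl ih =>
    rw [List.pairwise_cons] at hpw
    simp only [List.map_cons, List.mem_cons] at hmem
    by_cases hhd : hd.1 = i
    · have h0 : cntF drop i (hd :: tl) = 0 := by
        simp only [cntF, List.filter_cons]
        have hn : ¬ (hd.1 < i) := by omega
        have he : tl.filter (fun q => decide (q.1 < i) && !(decide (q.1 ∈ drop))) = [] := by
          apply List.filter_eq_nil_iff.mpr
          intro q hq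
          have := hpw.1 q hq
          have : ¬ (q.1 < i) := by omega
          simp [this]
        simp [hn, he]
      have htlcongr : tl.filter (fun p => !(decide (p.1 ∈ drop ++ [i]))) = tl.filter (fun p => !(decide (p.1 ∈ drop))) := by
        apply List.filter_congr
        intro q hq
        have := hpw.1 q hq
        have : ¬ (q.1 = i) := by omega
        simp [this]
      have hk : keptF drop (hd :: tl) = hd.2 :: keptF drop tl := by
        simp [keptF, hhd, hnd]
      have hk' : keptF (drop ++ [i]) (hd :: tl) = keptF drop tl := by
        simp only [keptF, List.filter_cons, htlcongr]
        simp [hhd]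
      rw [hk, hk', h0]
      exact ⟨rfl, by simp⟩
    · have hmem' : i ∈ tl.map Prod.fst := by tauto
      obtain ⟨q0, hq0, hq0i⟩ := List.mem_map.mp hmem'
      have hlt : hd.1 < i := by have := hpw.1 q0 hq0; omega
      have ih' := ih hpw.2 hmem'
      by_cases hin : hd.1 ∈ drop
      · have hk : keptF drop (hd :: tl) = keptF drop tl := by
          simp [keptF, hin]
        have hk' : keptF (drop ++ [i]) (hd :: tl) = keptF (drop ++ [i]) tl := by
          simp [keptF, hin]
        have hc : cntF drop i (hd :: tl) = cntF drop i tl := by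
          simp [cntF, hin]
        rw [hk, hk', hc]
        exact ih'
      · have hk : keptF drop (hd :: tl) = hd.2 :: keptF drop tl := by
          simp [keptF, hin]
        have hk' : keptF (drop ++ [i]) (hd :: tl) = hd.2 :: keptF (drop ++ [i]) tl := by
          simp [keptF, hin, hhd]
        have hc : cntF drop i (hd :: tl) = cntF drop i tl + 1 := by
          simp [cntF, hin, hlt]
        rw [hk, hk', hc]
        refine ⟨?_, by simpa using ih'.2⟩
        simpa [List.eraseIdx] using ih'.1

lemma rmb_erase_loop (stackB : List (Int × Char)) : ∀ (drop : PySem.Set Int)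
    (done : List (Int × Char)),
    done.Pairwise (fun p q => p.1 < q.1) →
    (stackB.map Prod.fst).Pairwise (· < ·) →
    (∀ p ∈ stackB, p.1 ∉ drop) →
    (∀ p ∈ stackB, p.1 ∈ done.map Prod.fst) →
    (stackB.map (fun p => cntF drop p.1 done)).reverse.foldl rmbPopAt (keptF drop done)
      = keptF (drop ++ stackB.map Prod.fst) done := by
  induction stackB using List.reverseRecOn with
  | nil => intro drop done _ _ _ _; simp
  | append_singleton sb q ih =>
    intro drop done hpw hsb hnotin hmem
    have hq1 : q.1 ∉ drop := hnotin q (by simp)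
    have hq2 : q.1 ∈ done.map Prod.fst := hmem q (by simp)
    have hlt : ∀ p ∈ sb, p.1 < q.1 := by
      intro p hp
      have := (List.pairwise_append.mp (by simpa using hsb)).2.2 p.1 (List.mem_map_of_mem hp) q.1 (by simp)
      exact this
    obtain ⟨herase, hcnt⟩ := rmb_erase_cnt done drop q.1 hpw hq2 hq1
    have hpop : rmbPopAt (keptF drop done) (cntF drop q.1 done) = keptF (drop ++ [q.1]) done := by
      unfold rmbPopAt
      rw [PySem.List.pop?_natCast _ _ hcnt]
      exact herase
    have hmapcongr : sb.map (fun p => cntF drop p.1 done)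
        = sb.map (fun p => cntF (drop ++ [q.1]) p.1 done) := by
      apply List.map_congr_left
      intro p hp
      rw [cntF_append_of_le drop p.1 q.1 done (le_of_lt (hlt p hp))]
    have ih' := ih (drop ++ [q.1]) done hpw
      (by
        have := (List.pairwise_append.mp (by simpa using hsb)).1
        exact this)
      (by
        intro p hp
        have h1 := hnotin p (by simp [hp])
        have h2 := hlt p hp
        simp only [List.mem_append, List.mem_singleton]
        rintro (h | h)
        · exact h1 h
        · omega)
      (fun p hp => hmem p (by simp [hp]))
    calc ((sb ++ [q]).map (fun p => cntF drop p.1 done)).reverse.foldl rmbPopAt (keptF drop done)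
        = (sb.map (fun p => cntF drop p.1 done)).reverse.foldl rmbPopAt
            (rmbPopAt (keptF drop done) (cntF drop q.1 done)) := by
          simp
      _ = ((sb.map (fun p => cntF (drop ++ [q.1]) p.1 done)).reverse).foldl rmbPopAt
            (keptF (drop ++ [q.1]) done) := by rw [hpop, hmapcongr]
      _ = keptF ((drop ++ [q.1]) ++ sb.map Prod.fst) done := ih'
      _ = keptF (drop ++ (sb ++ [q]).map Prod.fst) done := by
          apply keptF_congr
          intro x
          simp only [List.map_append, List.map_singleton, List.mem_append, List.mem_singleton]
          tauto

-- ===== VERDICT (by name: the statement is the Claim_ definition above) =====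
theorem remove_mismatched_brackets_spec : Claim_equal_remove_mismatched_brackets := by
  unfold Claim_equal_remove_mismatched_brackets
  intro prompt _
  unfold Spec_remove_mismatched_brackets remove_mismatched_brackets remove_mismatched_brackets_alt
  have h0 : rmbInv 0 [] [] [] [] [] PySem.Set.empty := by
    refine ⟨by simp, by simp, ?_, by simp, by simp, ?_, by simp, rfl, rfl, rfl⟩
    · intro j hj; simp [PySem.Set.empty] at hj
    · intro p hp; simp at hp
  have hloop := rmb_loop_inv prompt.toList 0 [] [] [] [] [] PySem.Set.empty h0
  rw [List.nil_append] at hloop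
  obtain ⟨h1, h2, h3, h4, h5, h6, h7, h8, h9, h10⟩ := hloop
  set cs := prompt.toList with hcs
  set F := cs.foldl rmbStepA ([], [], []) with hF
  set en := PySem.List.enumerate cs 0 with hen
  set G := en.foldl rmbStepB ([], PySem.Set.empty) with hG
  -- A's final pop loop computes keptF of drop plus the leftover stack indices
  have herase := rmb_erase_loop G.1 G.2 en h2 h5 h6 h7
  -- B's final drop set is G.2 followed by the leftover opener indices
  have hnodup : (G.1.map Prod.fst).Nodup := h5.nodup
  have hdrop2 : G.1.foldl (fun d p => PySem.Set.add d p.1) G.2 = G.2 ++ G.1.map Prod.fst := by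
    rw [← PySem.Set.update_map_eq_foldl_add]
    exact PySem.Set.update_eq_append_of_disjoint G.2 (G.1.map Prod.fst) hnodup
      (by
        intro x hx
        obtain ⟨p, hp, hpx⟩ := List.mem_map.mp hx
        exact hpx ▸ h6 p hp)
  have hfilter : (en.filter (fun p => !(PySem.Set.contains (G.2 ++ G.1.map Prod.fst) p.1))).map Prod.snd
      = keptF (G.2 ++ G.1.map Prod.fst) en := by
    unfold keptF
    congr 1
    apply List.filter_congr
    intro q _
    congr 1
    by_cases hq : q.1 ∈ G.2 ++ G.1.map Prod.fst
    · simp [hq]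
    · simp [hq]
  simp only
  rw [h10, h9, herase, hdrop2, hfilter]
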